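-- pv_equiv track=rewrite | github.com/theanujgautam/InfyTQ2023 | Programming Fundamentals using Python - Part 1/Assignment on Nested Iteration - Level 2.py | find_max
-- ===== SOURCE A (Python) =====
-- def find_max(num1, num2):
--     max_num=-1
--     my_list = []
--     digit_sum = 0
--     # Write your logic here
--     for num in range(num1, num2+1):
--         if(num % 5 == 0 and num // 10 != 0 and num // 100 == 0 and num1 < num2):
--             digit_sum = sum(int(digit) for digit in str(num))
--             if (digit_sum % 3 == 0):
--                 my_list.append(num)
--     if(len(my_list) == 0 ):
--         return -1
--     else:
--         max_num = max(my_list)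
--         return max_num
--
-- max_num=find_max(30,30)
-- ===== SOURCE B (Python) =====
-- def find_max(num1, num2):
--     # A two-digit multiple of 5 with digit sum divisible by 3 is exactly a
--     # two-digit multiple of 15, so the answer is a closed-form computation.
--     if num1 >= num2:
--         return -1
--     lo = max(num1, 10)
--     hi = min(num2, 99)
--     cand = (hi // 15) * 15
--     return cand if cand >= lo and cand >= 15 else -1
-- ===== Notes on version B (the rewrite author's own statement) =====
-- stated objective: faster
-- what changed: Replaced the full range scan with digit-sum string work by the closed-form observation that a two-digit multiple of 5 with digit sum divisible by 3 is exactly a two-digit multiple of 15, so the answer is (min(num2,99)//15)*15 when it lies in the window, else -1.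
import Mathlib
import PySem

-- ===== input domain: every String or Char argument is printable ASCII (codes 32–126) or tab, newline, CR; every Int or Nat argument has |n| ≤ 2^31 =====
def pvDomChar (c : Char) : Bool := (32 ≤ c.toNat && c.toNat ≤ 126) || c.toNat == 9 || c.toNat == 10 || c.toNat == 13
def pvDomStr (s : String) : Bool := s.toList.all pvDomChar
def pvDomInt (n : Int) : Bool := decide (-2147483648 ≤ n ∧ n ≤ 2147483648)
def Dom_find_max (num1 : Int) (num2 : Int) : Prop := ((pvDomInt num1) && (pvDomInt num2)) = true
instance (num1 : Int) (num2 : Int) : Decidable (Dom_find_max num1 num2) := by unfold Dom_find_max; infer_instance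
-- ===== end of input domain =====

set_option maxHeartbeats 1000000


-- B replaces A's full range scan (with per-element string digit sums) by the closed-form
-- observation that a two-digit multiple of 5 with digit sum divisible by 3 is exactly a
-- two-digit multiple of 15; objective: faster (O(1) instead of O(num2-num1)).

-- ===== PORT A =====
def find_max (num1 : Int) (num2 : Int) : Int :=
  let my_list : List Int := (PySem.List.pyRange num1 (num2+1) 1).foldl
    (fun my_list num =>
      if PySem.Int.mod num 5 == 0 && PySem.Int.floordiv num 10 != 0 &&
         PySem.Int.floordiv num 100 == 0 && decide (num1 < num2) then
        let digit_sum := ((PySem.Int.toChars num).map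
          (fun digit => (PySem.Int.ofChars? [digit]).getD 0)).sum
        if PySem.Int.mod digit_sum 3 == 0 then my_list ++ [num] else my_list
      else my_list) []
  if my_list.length == 0 then
    -1
  else
    match PySem.List.max? my_list (fun x => x) with
    | some max_num => max_num
    | none => -1

-- ===== PORT B =====
def find_max_alt (num1 : Int) (num2 : Int) : Int :=
  if num1 ≥ num2 then -1
  else
    let lo := max num1 10
    let hi := min num2 99
    let cand := (PySem.Int.floordiv hi 15) * 15
    if cand ≥ lo ∧ cand ≥ 15 then cand else -1

-- ===== PRECONDITION & SPEC =====
def Spec_find_max (num1 : Int) (num2 : Int) (out : Int) : Prop := out = find_max_alt num1 num2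
instance (num1 : Int) (num2 : Int) (out : Int) : Decidable (Spec_find_max num1 num2 out) := by unfold Spec_find_max; infer_instance

-- ===== CLAIM (what is proved, stated in full; the proofs are below) =====
def Claim_equal_find_max : Prop := ∀ (num1 : Int) (num2 : Int), Dom_find_max num1 num2 → Spec_find_max num1 num2 (find_max num1 num2)

-- ===== LEMMAS AND PROOFS =====

-- A's per-element test without the `num1 < num2` guard
def pvCore (num : Int) : Bool :=
  PySem.Int.mod num 5 == 0 && PySem.Int.floordiv num 10 != 0 &&
  PySem.Int.floordiv num 100 == 0 &&
  PySem.Int.mod (((PySem.Int.toChars num).map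
    (fun digit => (PySem.Int.ofChars? [digit]).getD 0)).sum) 3 == 0

-- the six qualifying numbers
def pvL : List Int := [15, 30, 45, 60, 75, 90]

lemma pvCore_bridge : ∀ n ∈ List.range 90,
    pvCore (10 + (n : Int)) = decide ((10 + (n : Int)) ∈ pvL) := by
  decide

lemma pv_fdiv_facts (a b : Int) (hb : 0 < b) :
    b * (a.fdiv b) + a.fmod b = a ∧ 0 ≤ a.fmod b ∧ a.fmod b < b := by
  refine ⟨Int.mul_fdiv_add_fmod a b, ?_, ?_⟩ <;> rw [Int.fmod_eq_emod]
  · simp only [show ((0:Int) ≤ b ∨ b ∣ a) = True by simp [le_of_lt hb], if_true, add_zero]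
    exact Int.emod_nonneg a (by omega)
  · simp only [show ((0:Int) ≤ b ∨ b ∣ a) = True by simp [le_of_lt hb], if_true, add_zero]
    exact Int.emod_lt_of_pos a hb

lemma pvCore_eq (x : Int) : pvCore x = decide (x ∈ pvL) := by
  by_cases hx : 10 ≤ x ∧ x ≤ 99
  · have hn : (x - 10).toNat < 90 ∧ x = 10 + ((x - 10).toNat : Int) := by omega
    rw [hn.2]
    exact pvCore_bridge _ (List.mem_range.mpr hn.1)
  · have h10 := pv_fdiv_facts x 10 (by norm_num)
    have h100 := pv_fdiv_facts x 100 (by norm_num)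
    have hL : decide (x ∈ pvL) = false := by
      simp only [pvL, List.mem_cons, List.not_mem_nil, or_false, decide_eq_false_iff_not]
      omega
    rw [hL]
    by_cases h0 : 0 ≤ x ∧ x < 10
    · have hz : x.fdiv 10 = 0 := by omega
      simp [pvCore, PySem.Int.floordiv, hz]
    · have hnz : x.fdiv 100 ≠ 0 := by omega
      simp [pvCore, PySem.Int.floordiv, hnz]

lemma pv_myList_eq (num1 num2 : Int) :
    ((PySem.List.pyRange num1 (num2+1) 1).foldl
      (fun my_list num =>
        if PySem.Int.mod num 5 == 0 && PySem.Int.floordiv num 10 != 0 &&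
           PySem.Int.floordiv num 100 == 0 && decide (num1 < num2) then
          let digit_sum := ((PySem.Int.toChars num).map
            (fun digit => (PySem.Int.ofChars? [digit]).getD 0)).sum
          if PySem.Int.mod digit_sum 3 == 0 then my_list ++ [num] else my_list
        else my_list) ([] : List Int))
    = (PySem.List.pyRange num1 (num2+1) 1).filter
        (fun x => pvCore x && decide (num1 < num2)) := by
  have hb : (fun (my_list : List Int) (num : Int) =>
      if PySem.Int.mod num 5 == 0 && PySem.Int.floordiv num 10 != 0 &&
         PySem.Int.floordiv num 100 == 0 && decide (num1 < num2) then
        let digit_sum := ((PySem.Int.toChars num).map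
          (fun digit => (PySem.Int.ofChars? [digit]).getD 0)).sum
        if PySem.Int.mod digit_sum 3 == 0 then my_list ++ [num] else my_list
      else my_list)
      = fun my_list num =>
        if (pvCore num && decide (num1 < num2)) then my_list ++ [num] else my_list := by
    funext acc num
    rcases Bool.eq_false_or_eq_true (decide (num1 < num2)) with hg | hg <;>
    rcases Bool.eq_false_or_eq_true (PySem.Int.mod (((PySem.Int.toChars num).map
      (fun digit => (PySem.Int.ofChars? [digit]).getD 0)).sum) 3 == 0) with hd | hd <;>
    simp only [pvCore, hg, hd] <;> simp
  rw [hb, PySem.List.foldl_append_if_eq_filter]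
  simp

lemma pv_filter_eq (num1 num2 : Int) (h : num1 < num2) :
    (PySem.List.pyRange num1 (num2+1) 1).filter
        (fun x => pvCore x && decide (num1 < num2))
    = pvL.filter (fun m => decide (num1 ≤ m ∧ m ≤ num2)) := by
  have hcongr : (PySem.List.pyRange num1 (num2+1) 1).filter
      (fun x => pvCore x && decide (num1 < num2))
      = (PySem.List.pyRange num1 (num2+1) 1).filter (fun x => decide (x ∈ pvL)) := by
    apply List.filter_congr
    intro x _
    simp [pvCore_eq, h]
  rw [hcongr]
  have nd1 : ((PySem.List.pyRange num1 (num2+1) 1).filter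
      (fun x => decide (x ∈ pvL))).Nodup :=
    (PySem.List.nodup_pyRange_one _ _).filter _
  have nd2 : (pvL.filter (fun m => decide (num1 ≤ m ∧ m ≤ num2))).Nodup :=
    (by decide : pvL.Nodup).filter _
  refine List.eq_of_perm_of_sorted (le := (· ≤ ·)) (fun a b _ _ hab hba => le_antisymm hab hba)
    (((PySem.List.pairwise_lt_pyRange_one _ _).filter _).imp le_of_lt)
    (((by decide : pvL.Pairwise (· < ·)).filter _).imp le_of_lt)
    ((List.perm_ext_iff_of_nodup nd1 nd2).mpr ?_)
  intro a
  simp only [List.mem_filter, PySem.List.mem_pyRange_one, decide_eq_true_eq]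
  constructor
  · rintro ⟨⟨h1, h2⟩, h3⟩
    exact ⟨h3, h1, by omega⟩
  · rintro ⟨h1, h2, h3⟩
    exact ⟨⟨h2, by omega⟩, h1⟩

lemma pv_final (num1 num2 : Int) (h : num1 < num2) :
    (if (pvL.filter (fun m => decide (num1 ≤ m ∧ m ≤ num2))).length == 0 then (-1 : Int)
     else
       match PySem.List.max? (pvL.filter (fun m => decide (num1 ≤ m ∧ m ≤ num2)))
           (fun x => x) with
       | some max_num => max_num
       | none => -1)
    = find_max_alt num1 num2 := by
  unfold find_max_alt
  obtain ⟨e, r0, r15⟩ := pv_fdiv_facts (min num2 99) 15 (by norm_num)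
  simp only [PySem.Int.floordiv, pvL, List.filter_cons, List.filter_nil]
  split_ifs <;>
    simp_all only [decide_eq_true_eq, PySem.List.max?_id_cons, List.foldl_cons, List.foldl_nil,
      List.length_cons, List.length_nil, beq_iff_eq] <;>
    first
      | omega
      | rfl

-- ===== VERDICT (by name: the statement is the Claim_ definition above) =====
theorem find_max_spec : Claim_equal_find_max := by
  intro num1 num2 _
  unfold Spec_find_max find_max
  rw [pv_myList_eq]
  by_cases h : num1 < num2
  · rw [pv_filter_eq num1 num2 h, pv_final num1 num2 h]
  · have : (PySem.List.pyRange num1 (num2+1) 1).filter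
        (fun x => pvCore x && decide (num1 < num2)) = [] := by
      simp [h]
    rw [this]
    have hge : num1 ≥ num2 := by omega
    simp [find_max_alt, hge]
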